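-- pv_equiv track=rewrite | github.com/Tonyfc52/IR | Homework4/AINews/3_tfidf - sentence to vectors by sklearn.py | querytoarray
-- ===== SOURCE A (Python) =====
-- def querytoarray(query, feature):
--     queryterm = query.split(' ')
--     vector = [0 for i in range(len(feature))]
--     for i in queryterm:
--         for j in range(len(feature)):
--             if i == feature[j]:
--                 vector[j] += 1
--     return vector
-- ===== SOURCE B (Python) =====
-- def querytoarray(query, feature):
--     counts = {}
--     for t in query.split(' '):
--         counts[t] = counts.get(t, 0) + 1
--     return [counts.get(f, 0) for f in feature]
-- ===== Notes on version B (the rewrite author's own statement) =====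
-- stated objective: simpler
-- what changed: Replaces the nested term-by-feature scan (rescanning all features for every query term) with one counting pass over the query terms into a frequency dict followed by a single lookup pass over the features.
import Mathlib
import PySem

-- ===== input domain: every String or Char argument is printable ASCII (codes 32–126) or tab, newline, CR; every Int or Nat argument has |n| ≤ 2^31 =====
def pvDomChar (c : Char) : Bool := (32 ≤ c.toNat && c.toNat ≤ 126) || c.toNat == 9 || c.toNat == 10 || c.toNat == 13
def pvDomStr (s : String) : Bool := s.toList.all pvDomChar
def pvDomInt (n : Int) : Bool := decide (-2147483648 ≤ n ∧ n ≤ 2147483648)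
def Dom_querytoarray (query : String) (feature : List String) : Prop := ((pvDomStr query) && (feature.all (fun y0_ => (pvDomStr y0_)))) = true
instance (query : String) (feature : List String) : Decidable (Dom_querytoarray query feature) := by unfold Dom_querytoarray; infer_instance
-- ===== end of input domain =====

-- B replaces A's nested term×feature scan by one counting pass over the query
-- terms into a frequency dict followed by a single lookup pass over the features.

-- ===== PORT A =====
def querytoarray (query : String) (feature : List String) : List Int :=
  let queryterm := (PySem.Str.split? query " ").getD []
  let vector : List Int := (PySem.List.pyRange 0 (feature.length : Int) 1).map (fun _ => 0)
  queryterm.foldl (fun vector i =>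
    (PySem.List.pyRange 0 (feature.length : Int) 1).foldl (fun vector j =>
      if i = PySem.List.pyGetD feature j "" then
        PySem.List.pySetD vector j (PySem.List.pyGetD vector j 0 + 1)
      else vector) vector) vector

-- ===== PORT B =====
def querytoarray_alt (query : String) (feature : List String) : List Int :=
  let counts : PySem.Dict String Int :=
    ((PySem.Str.split? query " ").getD []).foldl (fun d t => d.insert t (d.getD t 0 + 1)) PySem.Dict.empty
  feature.map (fun f => counts.getD f 0)

-- ===== PRECONDITION & SPEC =====
def Spec_querytoarray (query : String) (feature : List String) (out : List Int) : Prop := out = querytoarray_alt query feature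
instance (query : String) (feature : List String) (out : List Int) : Decidable (Spec_querytoarray query feature out) := by unfold Spec_querytoarray; infer_instance

-- ===== CLAIM (what is proved, stated in full; the proofs are below) =====
def Claim_equal_querytoarray : Prop := ∀ (query : String) (feature : List String), Dom_querytoarray query feature → Spec_querytoarray query feature (querytoarray query feature)

-- ===== LEMMAS AND PROOFS =====

-- generic: a fold over indices that acts on 'u ++ [x]' like it acts on 'u' (for
-- states satisfying an invariant P) leaves the appended last element untouched
lemma foldl_append_last {α β : Type} (idxs : List β) (f f' : List α → β → List α)
    (P : List α → Prop) (x : α) :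
    (∀ u j, P u → j ∈ idxs → f (u ++ [x]) j = f' u j ++ [x] ∧ P (f' u j)) →
    ∀ u, P u → idxs.foldl f (u ++ [x]) = idxs.foldl f' u ++ [x] := by
  induction idxs with
  | nil => intro _ u _; simp
  | cons j idxs ih =>
    intro h u hu
    obtain ⟨h1, h2⟩ := h u j hu (by simp)
    simp only [List.foldl_cons, h1]
    exact ih (fun u j hu hj => h u j hu (by simp [hj])) _ h2

-- A's inner loop over all feature indices equals a zipWith over the vector and feature
lemma inner_loop_eq (t : String) (feature : List String) :
    ∀ v : List Int, v.length = feature.length →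
    (PySem.List.pyRange 0 (feature.length : Int) 1).foldl (fun vector j =>
      if t = PySem.List.pyGetD feature j "" then
        PySem.List.pySetD vector j (PySem.List.pyGetD vector j 0 + 1)
      else vector) v
    = List.zipWith (fun x f => if t = f then x + 1 else x) v feature := by
  induction feature using List.reverseRecOn with
  | nil => intro v hv; simp at hv; simp [hv]
  | append_singleton gs g ih =>
    intro v hv
    simp only [List.length_append, List.length_singleton] at hv
    obtain ⟨w, x, rfl, hw⟩ : ∃ w x, v = w ++ [x] ∧ w.length = gs.length := by
      rcases List.eq_nil_or_concat v with rfl | ⟨w, x, rfl⟩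
      · simp at hv
      · exact ⟨w, x, by simp, by simpa using hv⟩
    have hsplit : PySem.List.pyRange 0 ((gs.length + 1 : Nat) : Int) 1
        = PySem.List.pyRange 0 (gs.length : Int) 1 ++ [(gs.length : Int)] := by
      push_cast
      exact PySem.List.pyRange_one_succ_right (by positivity)
    simp only [List.length_append, List.length_singleton, hsplit, List.foldl_append,
      List.foldl_cons, List.foldl_nil]
    -- the fold over the first gs.length indices ignores the appended last entries
    have hmain :
        (PySem.List.pyRange 0 (gs.length : Int) 1).foldl (fun vector j =>
          if t = PySem.List.pyGetD (gs ++ [g]) j "" then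
            PySem.List.pySetD vector j (PySem.List.pyGetD vector j 0 + 1)
          else vector) (w ++ [x])
        = (PySem.List.pyRange 0 (gs.length : Int) 1).foldl (fun vector j =>
          if t = PySem.List.pyGetD gs j "" then
            PySem.List.pySetD vector j (PySem.List.pyGetD vector j 0 + 1)
          else vector) w ++ [x] := by
      apply foldl_append_last _ _ _ (fun u => u.length = gs.length)
      · intro u j hu hj
        rw [PySem.List.mem_pyRange_one] at hj
        obtain ⟨hj0, hjlt⟩ := hj
        have hjn : j.toNat < gs.length := by omega
        have hgetF : PySem.List.pyGetD (gs ++ [g]) j "" = PySem.List.pyGetD gs j "" := by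
          rw [PySem.List.pyGetD_of_nonneg _ _ hj0, PySem.List.pyGetD_of_nonneg _ _ hj0]
          simp [List.getD, List.getElem?_append_left (by omega : j.toNat < gs.length)]
        have hgetV : PySem.List.pyGetD (u ++ [x]) j 0 = PySem.List.pyGetD u j 0 := by
          rw [PySem.List.pyGetD_of_nonneg _ _ hj0, PySem.List.pyGetD_of_nonneg _ _ hj0]
          simp [List.getD, List.getElem?_append_left (by omega : j.toNat < u.length)]
        have hset : ∀ y : Int, PySem.List.pySetD (u ++ [x]) j y = PySem.List.pySetD u j y ++ [x] := by
          intro y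
          rw [PySem.List.pySetD_of_nonneg _ _ hj0, PySem.List.pySetD_of_nonneg _ _ hj0]
          rw [List.set_append]
          simp [hu, hjn]
        constructor
        · rw [hgetF]
          split_ifs with hc
          · rw [hgetV, hset]
          · rfl
        · split_ifs <;> simp [hu, PySem.List.length_pySetD]
      · exact hw
    rw [hmain]
    rw [ih w hw]
    -- the last index touches exactly the appended entry
    have hlen : (List.zipWith (fun x f => if t = f then x + 1 else x) w gs).length = gs.length := by
      simp [hw]
    have hgetg : PySem.List.pyGetD (gs ++ [g]) (gs.length : Int) "" = g := by
      rw [PySem.List.pyGetD_of_nonneg _ _ (by positivity)]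
      simp [List.getD]
    have hgetx : PySem.List.pyGetD
        (List.zipWith (fun x f => if t = f then x + 1 else x) w gs ++ [x]) (gs.length : Int) 0 = x := by
      rw [PySem.List.pyGetD_of_nonneg _ _ (by positivity)]
      rw [show (gs.length:Int).toNat = gs.length from by omega]
      rw [List.getD]
      simp [hlen]
    have hsetx : ∀ y : Int, PySem.List.pySetD
        (List.zipWith (fun x f => if t = f then x + 1 else x) w gs ++ [x]) (gs.length : Int) y
        = List.zipWith (fun x f => if t = f then x + 1 else x) w gs ++ [y] := by
      intro y
      rw [PySem.List.pySetD_of_nonneg _ _ (by positivity)]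
      rw [List.set_append]
      simp [hlen]
    rw [List.zipWith_append hw]
    simp only [hgetg, hgetx, hsetx]
    split_ifs with hc <;> simp_all

-- A's outer loop, started from a vector of the form 'feature.map g',
-- adds each feature value's count among the processed terms
lemma outer_loop_eq (feature : List String) :
    ∀ (ts : List String) (g : String → Int),
    ts.foldl (fun vector i =>
      (PySem.List.pyRange 0 (feature.length : Int) 1).foldl (fun vector j =>
        if i = PySem.List.pyGetD feature j "" then
          PySem.List.pySetD vector j (PySem.List.pyGetD vector j 0 + 1)
        else vector) vector) (feature.map g)
    = feature.map (fun f => g f + (ts.count f : Int)) := by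
  intro ts
  induction ts with
  | nil => intro g; simp
  | cons t ts ih =>
    intro g
    simp only [List.foldl_cons]
    rw [inner_loop_eq t feature (feature.map g) (by simp)]
    have hstep : List.zipWith (fun x f => if t = f then x + 1 else x) (feature.map g) feature
        = feature.map (fun f => if t = f then g f + 1 else g f) := by
      rw [List.zipWith_map_left]
      simp [List.zipWith_self]
    rw [hstep, ih]
    apply List.map_congr_left
    intro f _
    by_cases hc : t = f
    · subst hc
      simp [List.count_cons_self]
      ring
    · rw [List.count_cons_of_ne (by simpa [eq_comm] using hc)]
      simp [hc]

-- ===== VERDICT (by name: the statement is the Claim_ definition above) =====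
theorem querytoarray_spec : Claim_equal_querytoarray := by
  intro query feature _
  unfold Spec_querytoarray querytoarray querytoarray_alt
  have hinit : (PySem.List.pyRange 0 (feature.length : Int) 1).map (fun _ => (0 : Int))
      = feature.map (fun _ => (0 : Int)) := by
    apply List.ext_getElem <;> simp [PySem.List.length_pyRange_one]
  simp only [hinit]
  rw [outer_loop_eq feature ((PySem.Str.split? query " ").getD []) (fun _ => 0)]
  apply List.map_congr_left
  intro f _
  rw [PySem.Dict.getD_foldl_insert_add_one]
  simp [PySem.Dict.empty, PySem.Dict.getD, PySem.Dict.get?]
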